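-- pv_equiv track=rewrite | github.com/JinShuo0510/insect_AS_analyze | jupyter_scripts/exon_extraction/scriptsss.py | partition_aligned_sequence_with_coords
-- ===== SOURCE A (Python) =====
-- def partition_aligned_sequence_with_coords(aligned_seq, exon_lengths):
--     """
--     根据原始 exon 长度（exon_lengths 列表），遍历带 gap 的比对序列，
--     按累计非 gap 字符数将比对序列分段，返回两个列表：
--       - segments：每个 exon 对应的原始比对片段（含 gap，可供参考）
--       - seg_coords：每个 exon 经过修剪后在对齐序列中的坐标 (start, end)，
--                     修剪时将片段开头和结尾处的 gap 忽略掉（即取第一个、最后一个非 gap 字符的位置）。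
--     """
--     segments = []
--     seg_coords = []
--     # 计算累计目标值，如 [L1, L1+L2, L1+L2+L3, ...]
--     cumulative_targets = []
--     cum = 0
--     for length in exon_lengths:
--         cum += length
--         cumulative_targets.append(cum)
--     raw_count = 0      # 跨所有 exon 的累计非 gap 字符数
--     current_segment_chars = []
--     seg_start = None   # 当前片段在对齐序列中的起始位置（1-based）
--     exon_index = 0     # 当前处理的 exon 编号（从 0 开始）
--     for i, char in enumerate(aligned_seq, start=1):
--         if seg_start is None:
--             seg_start = i
--         current_segment_chars.append(char)
--         if char != '-':
--             raw_count += 1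
--         if exon_index < len(cumulative_targets) and raw_count == cumulative_targets[exon_index]:
--             seg_end = i
--             segment_str = "".join(current_segment_chars)
--             # 修剪：去除片段首尾的 gap
--             left_offset = 0
--             while left_offset < len(segment_str) and segment_str[left_offset] == '-':
--                 left_offset += 1
--             right_offset = len(segment_str) - 1
--             while right_offset >= 0 and segment_str[right_offset] == '-':
--                 right_offset -= 1
--             adjusted_start = seg_start + left_offset if left_offset < len(segment_str) else seg_start
--             adjusted_end   = seg_start + right_offset if right_offset >= 0 else seg_end
--             segments.append(segment_str)
--             seg_coords.append((adjusted_start, adjusted_end))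
--             # 重置，准备处理下一个 exon
--             current_segment_chars = []
--             seg_start = None
--             exon_index += 1
--     return segments, seg_coords
-- ===== SOURCE B (Python) =====
-- def partition_aligned_sequence_with_coords(aligned_seq, exon_lengths):
--     # Pass 0: cumulative targets
--     cumulative_targets = []
--     cum = 0
--     for length in exon_lengths:
--         cum += length
--         cumulative_targets.append(cum)
--     # Pass 1: one scan recording the 1-based end index of each exon segment
--     boundaries = []
--     ptr = 0
--     count = 0
--     for i, ch in enumerate(aligned_seq, start=1):
--         if ch != '-':
--             count += 1
--         if ptr < len(cumulative_targets) and count == cumulative_targets[ptr]: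
--             boundaries.append(i)
--             ptr += 1
--     # Pass 2: rebuild each segment by slicing between consecutive boundaries
--     segments = []
--     seg_coords = []
--     prev = 0
--     for end in boundaries:
--         seg = aligned_seq[prev:end]
--         start = prev + 1
--         first = next((j for j, c in enumerate(seg) if c != '-'), None)
--         if first is None:
--             seg_coords.append((start, end))
--         else:
--             last = len(seg) - 1 - next(j for j, c in enumerate(reversed(seg)) if c != '-')
--             seg_coords.append((start + first, start + last))
--         segments.append(seg)
--         prev = end
--     return segments, seg_coords
-- ===== Notes on version B (the rewrite author's own statement) =====
-- stated objective: alternative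
-- what changed: A's single fused loop (segment character buffer, optional segment start, trim while-loops at each emit) is replaced by a two-pass decomposition: one scan that records only the boundary end-indices of each exon, then a second pass that slices the sequence between consecutive boundaries and locates the first/last non-gap character for the trimmed coordinates.
import Mathlib
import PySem

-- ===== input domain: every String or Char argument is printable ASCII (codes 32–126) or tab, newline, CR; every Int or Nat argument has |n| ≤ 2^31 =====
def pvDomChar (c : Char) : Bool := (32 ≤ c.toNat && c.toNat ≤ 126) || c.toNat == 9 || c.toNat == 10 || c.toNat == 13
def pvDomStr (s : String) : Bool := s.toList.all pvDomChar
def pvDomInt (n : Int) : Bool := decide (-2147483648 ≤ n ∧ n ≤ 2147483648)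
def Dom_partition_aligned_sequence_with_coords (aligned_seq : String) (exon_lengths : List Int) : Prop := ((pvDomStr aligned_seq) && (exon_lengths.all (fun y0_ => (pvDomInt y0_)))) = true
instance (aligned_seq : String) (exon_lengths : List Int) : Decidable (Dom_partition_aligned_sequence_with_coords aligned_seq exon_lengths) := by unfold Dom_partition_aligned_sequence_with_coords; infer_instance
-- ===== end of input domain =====

-- B replaces A's single stateful loop (segment buffer, optional segment start, trim while-loops)
-- by a two-pass decomposition: one scan records only the boundary end-indices, a second pass
-- rebuilds each segment by slicing and locates the first/last non-gap char; objective: simpler.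


-- ===== PORT A =====
-- cumulative_targets loop of A
def pvCumA : List Int → Int → List Int → List Int
  | [], _cum, acc => acc
  | l :: rest, cum, acc => pvCumA rest (cum + l) (acc ++ [cum + l])

-- A's 'while left_offset < len and s[left_offset] == '-'' forward scan
def pvLeftOffA : List Char → Nat
  | [] => 0
  | c :: t => if c = '-' then pvLeftOffA t + 1 else 0

-- A's main for-loop; the backward while-loop decrementing right_offset over trailing '-'
-- is the same forward scan on the reversed segment (exact: it counts trailing gaps).
def pvLoopA (T : List Int) : List Char → Int → Int → List Char → Option Int → Nat →
    List String → List (Int × Int) → List String × List (Int × Int)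
  | [], _i, _r, _cur, _ss, _p, segs, coords => (segs, coords)
  | c :: cs, i, r, cur, ss, p, segs, coords =>
    let segStart := ss.getD i
    let cur' := cur ++ [c]
    let r' := if c ≠ '-' then r + 1 else r
    if p < T.length ∧ r' = T.getD p 0 then
      let segStr := cur'
      let lo := pvLeftOffA segStr
      let ro : Int := (segStr.length : Int) - 1 - (pvLeftOffA segStr.reverse : Int)
      let adjStart := if (lo : Int) < (segStr.length : Int) then segStart + lo else segStart
      let adjEnd := if 0 ≤ ro then segStart + ro else i
      pvLoopA T cs (i + 1) r' [] none (p + 1) (segs ++ [String.ofList segStr]) (coords ++ [(adjStart, adjEnd)])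
    else
      pvLoopA T cs (i + 1) r' cur' (some segStart) p segs coords

def partition_aligned_sequence_with_coords (aligned_seq : String) (exon_lengths : List Int) : List String × (List (Int × Int)) :=
  let T := pvCumA exon_lengths 0 []
  pvLoopA T aligned_seq.toList 1 0 [] none 0 [] []

-- ===== PORT B =====
-- cumulative_targets loop of Source B (same first pass as A, per the plan)
def pvCumB : List Int → Int → List Int → List Int
  | [], _cum, acc => acc
  | l :: rest, cum, acc => pvCumB rest (cum + l) (acc ++ [cum + l])

-- Source B pass 1: record the 1-based end index of each exon segment
def pvBoundsB (T : List Int) : List Char → Int → Int → Nat → List Int → List Int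
  | [], _i, _cnt, _p, bs => bs
  | c :: cs, i, cnt, p, bs =>
    let cnt' := if c ≠ '-' then cnt + 1 else cnt
    if p < T.length ∧ cnt' = T.getD p 0 then pvBoundsB T cs (i + 1) cnt' (p + 1) (bs ++ [i])
    else pvBoundsB T cs (i + 1) cnt' p bs

-- Source B pass 2: slice between consecutive boundaries; 'next(... enumerate ...)' = findIdx?.
-- The inner 'next' over reversed(seg) is only reached when a non-gap exists, so .getD 0 is dead.
def pvRenderB (full : List Char) : Int → List Int → List String → List (Int × Int) →
    List String × List (Int × Int)
  | _prev, [], segs, coords => (segs, coords)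
  | prev, e :: bs, segs, coords =>
    let seg := PySem.List.slice full (some prev) (some e)
    let start := prev + 1
    let coord :=
      match seg.findIdx? (fun c => c ≠ '-') with
      | none => (start, e)
      | some first =>
        let last : Int := (seg.length : Int) - 1 -
          (((seg.reverse.findIdx? (fun c => c ≠ '-')).getD 0 : Nat) : Int)
        (start + (first : Int), start + last)
    pvRenderB full e bs (segs ++ [String.ofList seg]) (coords ++ [coord])

def partition_aligned_sequence_with_coords_alt (aligned_seq : String) (exon_lengths : List Int) : List String × (List (Int × Int)) :=
  let T := pvCumB exon_lengths 0 []
  let bs := pvBoundsB T aligned_seq.toList 1 0 0 []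
  pvRenderB aligned_seq.toList 0 bs [] []

-- ===== PRECONDITION & SPEC =====
def Spec_partition_aligned_sequence_with_coords (aligned_seq : String) (exon_lengths : List Int) (out : List String × (List (Int × Int))) : Prop := out = partition_aligned_sequence_with_coords_alt aligned_seq exon_lengths
instance (aligned_seq : String) (exon_lengths : List Int) (out : List String × (List (Int × Int))) : Decidable (Spec_partition_aligned_sequence_with_coords aligned_seq exon_lengths out) := by unfold Spec_partition_aligned_sequence_with_coords; infer_instance

-- ===== CLAIM (what is proved, stated in full; the proofs are below) =====
def Claim_equal_partition_aligned_sequence_with_coords : Prop := ∀ (aligned_seq : String) (exon_lengths : List Int), Dom_partition_aligned_sequence_with_coords aligned_seq exon_lengths → Spec_partition_aligned_sequence_with_coords aligned_seq exon_lengths (partition_aligned_sequence_with_coords aligned_seq exon_lengths)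

-- ===== LEMMAS AND PROOFS =====

theorem pvCum_eq (l : List Int) : ∀ cum acc, pvCumA l cum acc = pvCumB l cum acc := by
  induction l with
  | nil => intro cum acc; rfl
  | cons x t ih => intro cum acc; simp only [pvCumA, pvCumB]; exact ih _ _

theorem pvBoundsB_acc (T : List Int) (cs : List Char) :
    ∀ i cnt p bs, pvBoundsB T cs i cnt p bs = bs ++ pvBoundsB T cs i cnt p [] := by
  induction cs with
  | nil => intro i cnt p bs; simp [pvBoundsB]
  | cons c t ih =>
    intro i cnt p bs
    simp only [pvBoundsB]
    split <;>
    · rw [ih _ _ _ (bs ++ [i]), ih _ _ _ ([] ++ [i]), ih _ _ _ bs]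
      split <;> simp

theorem pvLeftOffA_eq_findIdx? (l : List Char) :
    pvLeftOffA l = (l.findIdx? (fun c => c ≠ '-')).getD l.length := by
  induction l with
  | nil => rfl
  | cons c t ih =>
    by_cases hc : c = '-'
    · subst hc
      cases h : t.findIdx? (fun c => c ≠ '-') with
      | none =>
        rw [h] at ih
        simp only [ne_eq, decide_not] at h
        simp [pvLeftOffA, List.findIdx?_cons, h, ih]
      | some j =>
        rw [h] at ih
        simp only [ne_eq, decide_not] at h
        simp [pvLeftOffA, List.findIdx?_cons, h, ih]
    · simp [pvLeftOffA, hc, List.findIdx?_cons]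

theorem findIdx?_reverse_none (l : List Char) (p : Char → Bool) :
    l.reverse.findIdx? p = none ↔ l.findIdx? p = none := by
  simp [List.findIdx?_eq_none_iff]

-- the key invariant: A's fused loop from a mid-scan state equals B's boundary scan + render
theorem pvMain (T : List Int) (full : List Char) :
    ∀ cs k (prev : Nat) r p segs coords,
      cs = full.drop k → prev ≤ k → k ≤ full.length →
      pvLoopA T cs ((k : Int) + 1) r ((full.drop prev).take (k - prev))
          (if k = prev then none else some ((prev : Int) + 1)) p segs coords
        = pvRenderB full (prev : Int) (pvBoundsB T cs ((k : Int) + 1) r p []) segs coords := by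
  intro cs
  induction cs with
  | nil => intro k prev r p segs coords _ _ _; simp [pvLoopA, pvBoundsB, pvRenderB]
  | cons c t ih =>
    intro k prev r p segs coords hcs hpk hk
    have hklt : k < full.length := by
      by_contra h
      have hnil : full.drop k = [] := List.drop_eq_nil_of_le (by omega)
      rw [hnil] at hcs; exact (List.cons_ne_nil _ _) hcs
    have hdrop : full.drop k = full[k] :: full.drop (k + 1) :=
      List.drop_eq_getElem_cons hklt
    rw [hdrop] at hcs
    have hc : c = full[k] := (List.cons.injEq _ _ _ _ ▸ hcs).1
    have ht : t = full.drop (k + 1) := (List.cons.injEq _ _ _ _ ▸ hcs).2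
    subst hc ht
    -- the segment buffer after appending this char
    have hcur : (full.drop prev).take (k - prev) ++ [full[k]] = (full.drop prev).take (k + 1 - prev) := by
      have h1 : k + 1 - prev = (k - prev) + 1 := by omega
      rw [h1, List.take_add_one]
      have h2 : (full.drop prev)[k - prev]? = some full[k] := by
        rw [List.getElem?_drop]
        have : prev + (k - prev) = k := by omega
        rw [this, List.getElem?_eq_getElem hklt]
      simp [h2]
    have hss : (if k = prev then (none : Option Int) else some ((prev : Int) + 1)).getD ((k : Int) + 1)
        = (prev : Int) + 1 := by
      split
      · simp_all
      · rfl
    have hcast : ((k : Int) + 1 + 1) = (((k + 1 : Nat) : Int) + 1) := by push_cast; ring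
    simp only [pvLoopA, pvBoundsB, hss, hcur, hcast]
    generalize (if full[k] ≠ '-' then r + 1 else r) = r'
    -- B's slice equals A's buffered segment
    have hslice : PySem.List.slice full (some (prev : Int)) (some ((k : Int) + 1))
        = (full.drop prev).take (k + 1 - prev) := by
      rw [show ((k : Int) + 1) = ((k + 1 : Nat) : Int) by push_cast; ring]
      exact PySem.List.slice_natCast full prev (k + 1)
    split
    · -- boundary hit: A emits the buffered segment, B records index k+1
      rw [pvBoundsB_acc T _ _ _ _ ([] ++ [(k : Int) + 1])]
      simp only [List.nil_append, List.singleton_append, pvRenderB, hslice]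
      set σ := (full.drop prev).take (k + 1 - prev) with hσ
      have hcoord :
          ((if ((pvLeftOffA σ : Nat) : Int) < ((σ.length : Nat) : Int)
              then (prev : Int) + 1 + (pvLeftOffA σ : Int) else (prev : Int) + 1),
            (if (0 : Int) ≤ ((σ.length : Nat) : Int) - 1 - (pvLeftOffA σ.reverse : Int)
              then (prev : Int) + 1 + (((σ.length : Nat) : Int) - 1 - (pvLeftOffA σ.reverse : Int))
              else (k : Int) + 1))
          = (match σ.findIdx? (fun c => c ≠ '-') with
             | none => ((prev : Int) + 1, (k : Int) + 1)
             | some first =>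
               ((prev : Int) + 1 + (first : Int),
                (prev : Int) + 1 + ((σ.length : Int) - 1 -
                  (((σ.reverse.findIdx? (fun c => c ≠ '-')).getD 0 : Nat) : Int)))) := by
        cases hf : σ.findIdx? (fun c => c ≠ '-') with
        | none =>
          have hrev : σ.reverse.findIdx? (fun c => c ≠ '-') = none :=
            (findIdx?_reverse_none σ _).mpr hf
          have h1 : pvLeftOffA σ = σ.length := by rw [pvLeftOffA_eq_findIdx?, hf]; rfl
          have h2 : pvLeftOffA σ.reverse = σ.length := by
            rw [pvLeftOffA_eq_findIdx?, hrev]; simp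
          simp only [h1, h2]
          rw [if_neg (lt_irrefl _), if_neg (by omega)]
        | some j =>
          obtain ⟨hj, -, -⟩ := List.findIdx?_eq_some_iff_getElem.mp hf
          obtain ⟨j', hj'⟩ : ∃ j', σ.reverse.findIdx? (fun c => c ≠ '-') = some j' := by
            cases hr : σ.reverse.findIdx? (fun c => c ≠ '-') with
            | none => rw [(findIdx?_reverse_none σ _).mp hr] at hf; exact absurd hf (by simp)
            | some j' => exact ⟨j', rfl⟩
          have hj'lt : j' < σ.length := by
            obtain ⟨h0, -, -⟩ := List.findIdx?_eq_some_iff_getElem.mp hj'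
            simpa using h0
          have h1 : pvLeftOffA σ = j := by rw [pvLeftOffA_eq_findIdx?, hf]; rfl
          have h2 : pvLeftOffA σ.reverse = j' := by
            rw [pvLeftOffA_eq_findIdx?, hj']; rfl
          simp only [h1, h2, hj', Option.getD_some]
          rw [if_pos (by exact_mod_cast hj), if_pos (by omega)]
      rw [hcoord]
      have H := ih (k + 1) (k + 1) r' (p + 1)
        (segs ++ [String.ofList σ])
        (coords ++ [(match σ.findIdx? (fun c => c ≠ '-') with
             | none => ((prev : Int) + 1, (k : Int) + 1)
             | some first =>
               ((prev : Int) + 1 + (first : Int),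
                (prev : Int) + 1 + ((σ.length : Int) - 1 -
                  (((σ.reverse.findIdx? (fun c => c ≠ '-')).getD 0 : Nat) : Int))))])
        rfl (by omega) (by omega)
      simp only [Nat.sub_self, List.take_zero] at H
      exact H
    · -- no boundary: both loops just advance
      have H := ih (k + 1) prev r' p segs coords rfl (by omega) (by omega)
      rw [if_neg (by omega : ¬ k + 1 = prev)] at H
      exact H

-- ===== VERDICT (by name: the statement is the Claim_ definition above) =====
theorem partition_aligned_sequence_with_coords_spec : Claim_equal_partition_aligned_sequence_with_coords := by
  intro aligned_seq exon_lengths _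
  unfold Spec_partition_aligned_sequence_with_coords
  unfold partition_aligned_sequence_with_coords partition_aligned_sequence_with_coords_alt
  rw [← pvCum_eq]
  have h := pvMain (pvCumA exon_lengths 0 []) aligned_seq.toList aligned_seq.toList 0 0 0 0 [] []
    (by simp) (by omega) (by omega)
  simpa using h
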